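-- pv_equiv track=rewrite | github.com/dudanian/anki-ojad | ojad.py | compress_moras
-- ===== SOURCE A (Python) =====
-- def compress_moras(word):
--     """
--     I needed to do this to fix a bug with small characters.
--     Basically there would be two top accents because OJAD separates them.
--     """
--     new_word = []
--     current_mora, current_accent = word[0]
--     for next_mora, next_accent in word[1:]:
--         if current_accent == next_accent:
--             current_mora += next_mora
--         else:
--             new_word.append((current_mora, current_accent))
--             current_mora = next_mora
--             current_accent = next_accent
--     else:
--         new_word.append((current_mora, current_accent))
--
--     return new_word
-- ===== SOURCE B (Python) =====
-- def compress_moras(word):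
--     res = []
--     i = 0
--     n = len(word)
--     while i < n:
--         accent = word[i][1]
--         j = i + 1
--         while j < n and word[j][1] == accent:
--             j += 1
--         res.append((''.join(m for m, _ in word[i:j]), accent))
--         i = j
--     return res
-- ===== Notes on version B (the rewrite author's own statement) =====
-- stated objective: alternative
-- what changed: Replaces A's single pass with a running (mora, accent) accumulator and flush-on-change by an index-based group scanner: an inner loop finds the end of each equal-accent run and the run's moras are joined at once with ''.join over a slice.
import Mathlib
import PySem

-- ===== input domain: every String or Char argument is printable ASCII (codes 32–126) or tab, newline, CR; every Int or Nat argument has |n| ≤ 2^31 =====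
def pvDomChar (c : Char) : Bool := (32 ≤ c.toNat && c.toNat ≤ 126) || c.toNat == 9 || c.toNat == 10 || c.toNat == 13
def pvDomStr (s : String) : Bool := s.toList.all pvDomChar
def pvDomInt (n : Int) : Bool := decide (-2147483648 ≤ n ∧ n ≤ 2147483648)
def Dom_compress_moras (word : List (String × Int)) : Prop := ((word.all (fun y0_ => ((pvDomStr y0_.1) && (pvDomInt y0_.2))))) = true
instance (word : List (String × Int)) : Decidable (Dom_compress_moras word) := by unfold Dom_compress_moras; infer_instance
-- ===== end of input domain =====

-- Header: B replaces A's running-accumulator pass by an index-based run scanner (inner loop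
-- finds the end of each equal-accent run, moras joined per run); objective: alternative.


-- ===== PORT A =====
-- literal port of A: word[0] unpacked (empty word raises in Python, excluded by Pre_),
-- then a fold over word[1:] carrying (current_mora, current_accent, new_word)
-- A's loop body: carries (current_mora, current_accent, new_word)
def stepA (st : String × Int × List (String × Int)) (p : String × Int) :
    String × Int × List (String × Int) :=
  if st.2.1 == p.2 then (st.1 ++ p.1, st.2.1, st.2.2)
  else (p.1, p.2, st.2.2 ++ [(st.1, st.2.1)])

def compress_moras (word : List (String × Int)) : List (String × Int) :=
  match word with
  | [] => []   -- unreachable under Pre_ (Python raises IndexError here)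
  | (m0, a0) :: _ =>
    let s := (PySem.List.slice word (some 1) none).foldl stepA
      (m0, a0, ([] : List (String × Int)))
    s.2.2 ++ [(s.1, s.2.1)]

-- ===== PORT B =====
-- B-side helpers: the two while loops of Source B
def altInner (word : List (String × Int)) (n : Nat) (accent : Int) (j : Nat) : Nat :=
  if _h : j < n then
    if (PySem.List.pyGetD word (j : Int) ("", 0)).2 == accent then
      altInner word n accent (j + 1)
    else j
  else j
termination_by n - j

theorem le_altInner (word : List (String × Int)) (n : Nat) (accent : Int) (j : Nat) :
    j ≤ altInner word n accent j := by
  unfold altInner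
  split
  · split
    · exact le_trans (Nat.le_succ j) (le_altInner word n accent (j + 1))
    · exact le_refl j
  · exact le_refl j
termination_by n - j

def altOuter (word : List (String × Int)) (n : Nat) (i : Nat) (res : List (String × Int)) :
    List (String × Int) :=
  if _h : i < n then
    let accent := (PySem.List.pyGetD word (i : Int) ("", 0)).2
    let j := altInner word n accent (i + 1)
    altOuter word n j
      (res ++ [(PySem.Str.join ""
        ((PySem.List.slice word (some (i : Int)) (some (j : Int))).map Prod.fst), accent)])
  else res
termination_by n - i
decreasing_by
  have := le_altInner word n ((PySem.List.pyGetD word (i : Int) ("", 0)).2) (i + 1)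
  omega

def compress_moras_alt (word : List (String × Int)) : List (String × Int) :=
  altOuter word word.length 0 []

-- ===== PRECONDITION & SPEC =====
-- Pre_ excludes exactly the empty word, on which A raises IndexError (word[0]).
def Pre_compress_moras (word : List (String × Int)) : Prop := word ≠ []
instance (word : List (String × Int)) : Decidable (Pre_compress_moras word) := by
  unfold Pre_compress_moras; infer_instance

def pvWitness_compress_moras : (List (String × Int)) := [("a", 1), ("b", 1), ("c", 0)]

def Spec_compress_moras (word : List (String × Int)) (out : List (String × Int)) : Prop :=
  out = compress_moras_alt word
instance (word : List (String × Int)) (out : List (String × Int)) :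
    Decidable (Spec_compress_moras word out) := by unfold Spec_compress_moras; infer_instance

-- ===== CLAIM (what is proved, stated in full; the proofs are below) =====
def Claim_equal_compress_moras : Prop := ∀ (word : List (String × Int)),
  Dom_compress_moras word → Pre_compress_moras word →
  Spec_compress_moras word (compress_moras word)

-- ===== LEMMAS AND PROOFS =====

-- reference function: recursion over equal-accent runs
def grp : List (String × Int) → List (String × Int)
  | [] => []
  | (m, a) :: rest =>
      ((rest.takeWhile (fun p => p.2 == a)).foldl (fun acc p => acc ++ p.1) m, a)
        :: grp (rest.dropWhile (fun p => p.2 == a))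
termination_by l => l.length
decreasing_by
  simp only [List.length_cons]
  exact Nat.lt_succ_of_le (List.length_dropWhile_le _ _)

theorem A_loop (rest : List (String × Int)) (m : String) (a : Int)
    (acc : List (String × Int)) :
    (rest.foldl stepA (m, a, acc)).2.2 ++
      [((rest.foldl stepA (m, a, acc)).1, (rest.foldl stepA (m, a, acc)).2.1)]
      = acc ++ grp ((m, a) :: rest) := by
  induction rest generalizing m a acc with
  | nil => simp [grp]
  | cons p t ih =>
    obtain ⟨m', a'⟩ := p
    by_cases hx : a = a'
    · subst hx
      simp only [List.foldl_cons, stepA, BEq.rfl, if_pos]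
      rw [ih]
      simp [grp]
    · have hb : (a == a') = false := by simp [hx]
      have hb' : (a' == a) = false := by simp [Ne.symm hx]
      simp only [List.foldl_cons, stepA, hb, Bool.false_eq_true, if_false]
      rw [ih]
      rw [show grp ((m, a) :: (m', a') :: t) = (m, a) :: grp ((m', a') :: t) from by
        simp [grp, hb']]
      simp

theorem compress_moras_eq_grp (word : List (String × Int)) : compress_moras word = grp word := by
  match word with
  | [] => simp [compress_moras, grp]
  | (m, a) :: rest =>
    simpa [compress_moras, PySem.List.slice_from_one] using A_loop rest m a []

-- string fold/join facts for B's ''.join over a run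
theorem foldl_append_shift (l : List String) (s t : String) :
    s ++ l.foldl (· ++ ·) t = l.foldl (· ++ ·) (s ++ t) := by
  induction l generalizing t with
  | nil => rfl
  | cons u us ih => simp only [List.foldl_cons]; rw [ih, String.append_assoc]

theorem join_cons_foldl (s : String) (l : List String) :
    PySem.Str.join "" (s :: l) = l.foldl (· ++ ·) s := by
  induction l generalizing s with
  | nil =>
    simp [PySem.Str.join, PySem.Chars.join_singleton]
  | cons t ts ih =>
    have hstep : PySem.Str.join "" (s :: t :: ts) = s ++ PySem.Str.join "" (t :: ts) := by
      apply String.toList_inj.mp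
      simp [PySem.Str.join, PySem.Chars.join_cons_cons]
    rw [hstep, ih, List.foldl_cons, foldl_append_shift]

theorem altInner_spec (word : List (String × Int)) (a : Int) (j : Nat)
    (hj : j ≤ word.length) :
    altInner word word.length a j
      = j + ((word.drop j).takeWhile (fun p => p.2 == a)).length := by
  unfold altInner
  split
  · rename_i h
    rw [PySem.List.pyGetD_ofNat word j ("", 0) h,
        List.drop_eq_getElem_cons h, List.takeWhile_cons]
    by_cases hb : (word[j].2 == a) = true
    · rw [altInner_spec word a (j + 1) h]
      simp [hb]
      omega
    · simp only [Bool.not_eq_true] at hb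
      simp [hb]
  · rename_i h
    have : j = word.length := by omega
    subst this
    simp [List.drop_length]
termination_by word.length - j

theorem altOuter_spec (word : List (String × Int)) (i : Nat) (res : List (String × Int))
    (hi : i ≤ word.length) :
    altOuter word word.length i res = res ++ grp (word.drop i) := by
  unfold altOuter
  split
  · rename_i h
    rw [PySem.List.pyGetD_ofNat word i ("", 0) h]
    rcases hxi : word[i] with ⟨mi, ai⟩
    set pred : (String × Int) → Bool := fun p => p.2 == ai with hpred
    set tw := (word.drop (i + 1)).takeWhile pred with htw
    set dw := (word.drop (i + 1)).dropWhile pred with hdw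
    have hsplit : tw ++ dw = word.drop (i + 1) := List.takeWhile_append_dropWhile
    have hlen : tw.length ≤ word.length - (i + 1) := by
      have := List.IsPrefix.length_le (List.takeWhile_prefix pred (l := word.drop (i + 1)))
      simpa using this
    have hj : altInner word word.length ai (i + 1) = i + 1 + tw.length :=
      altInner_spec word ai (i + 1) h
    have hslice : PySem.List.slice word (some (i : Int)) (some ((i + 1 + tw.length : Nat) : Int))
        = (mi, ai) :: tw := by
      rw [PySem.List.slice_natCast, List.drop_eq_getElem_cons h, hxi,
        show i + 1 + tw.length - i = tw.length + 1 from by omega,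
        List.take_succ_cons, ← hsplit, List.take_left]
    have hdrop : word.drop (i + 1 + tw.length) = dw := by
      rw [← List.drop_drop, ← hsplit, List.drop_left]
    simp only [hj]
    rw [hslice, altOuter_spec word (i + 1 + tw.length) _ (by omega), hdrop,
      List.drop_eq_getElem_cons h, hxi, grp,
      List.map_cons, join_cons_foldl, List.foldl_map]
    simp [htw, hdw, hpred]
  · rename_i h
    have : i = word.length := by omega
    subst this
    simp [List.drop_length, grp]
termination_by word.length - i
decreasing_by
  have := le_altInner word word.length ((PySem.List.pyGetD word (i : Int) ("", 0)).2) (i + 1)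
  omega

theorem compress_moras_alt_eq_grp (word : List (String × Int)) :
    compress_moras_alt word = grp word := by
  unfold compress_moras_alt
  have := altOuter_spec word 0 [] (Nat.zero_le _)
  simpa using this

-- ===== VERDICT (by name: the statement is the Claim_ definition above) =====
theorem compress_moras_spec : Claim_equal_compress_moras := by
  intro word _ _
  unfold Spec_compress_moras
  rw [compress_moras_eq_grp, compress_moras_alt_eq_grp]
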